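-- pv_equiv track=rewrite | github.com/mithunpaul08/mean-teacher | pytorch/mean_teacher/model/train_rao.py | calculate_label_overlap_between_teacher_and_student_predictions
-- ===== SOURCE A (Python) =====
-- def calculate_label_overlap_between_teacher_and_student_predictions(teacher_lex_predictions,student_delex_predictions,gold_labels):
--     teacher_lex_same_as_gold = 0
--     student_delex_same_as_gold = 0
--     student_teacher_match = 0
--     student_teacher_match_but_not_same_as_gold = 0
--     student_teacher_match_and_same_as_gold = 0
--     student_delex_same_as_gold_but_teacher_is_different = 0
--     teacher_lex_same_as_gold_but_student_is_different = 0
--     assert len(student_delex_predictions)== len(teacher_lex_predictions) == len(gold_labels)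
--     for student, teacher, gold in (zip(student_delex_predictions, teacher_lex_predictions, gold_labels)):
--         if teacher == gold:
--             teacher_lex_same_as_gold += 1
--             if not student == teacher:
--                 teacher_lex_same_as_gold_but_student_is_different += 1
--         if student == gold:
--             student_delex_same_as_gold += 1
--             if not student == teacher:
--                 student_delex_same_as_gold_but_teacher_is_different += 1
--
--         if teacher == student:
--             student_teacher_match += 1
--             if not teacher == gold:
--                 student_teacher_match_but_not_same_as_gold += 1
--             else:
--                 student_teacher_match_and_same_as_gold += 1
--
--     return teacher_lex_same_as_gold , \
--            student_delex_same_as_gold,\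
--     student_teacher_match ,\
--     student_teacher_match_but_not_same_as_gold ,\
--     student_teacher_match_and_same_as_gold ,\
--     student_delex_same_as_gold_but_teacher_is_different,\
--     teacher_lex_same_as_gold_but_student_is_different
-- ===== SOURCE B (Python) =====
-- def calculate_label_overlap_between_teacher_and_student_predictions(teacher_lex_predictions, student_delex_predictions, gold_labels):
--     assert len(student_delex_predictions) == len(teacher_lex_predictions) == len(gold_labels)
--     # tally phase: one counter per agreement pattern (tg, sg, ts) packed as 4*tg+2*sg+ts
--     counts = [0] * 8
--     for student, teacher, gold in zip(student_delex_predictions, teacher_lex_predictions, gold_labels):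
--         counts[4 * (teacher == gold) + 2 * (student == gold) + (teacher == student)] += 1
--     # derive phase: each reported figure is a sum of buckets
--     teacher_lex_same_as_gold = counts[4] + counts[5] + counts[6] + counts[7]
--     student_delex_same_as_gold = counts[2] + counts[3] + counts[6] + counts[7]
--     student_teacher_match = counts[1] + counts[3] + counts[5] + counts[7]
--     student_teacher_match_but_not_same_as_gold = counts[1] + counts[3]
--     student_teacher_match_and_same_as_gold = counts[5] + counts[7]
--     student_delex_same_as_gold_but_teacher_is_different = counts[2] + counts[6]
--     teacher_lex_same_as_gold_but_student_is_different = counts[4] + counts[6]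
--     return (teacher_lex_same_as_gold,
--             student_delex_same_as_gold,
--             student_teacher_match,
--             student_teacher_match_but_not_same_as_gold,
--             student_teacher_match_and_same_as_gold,
--             student_delex_same_as_gold_but_teacher_is_different,
--             teacher_lex_same_as_gold_but_student_is_different)
-- ===== Notes on version B (the rewrite author's own statement) =====
-- stated objective: alternative
-- what changed: Replaces A's seven interleaved running counters with nested conditionals by a two-phase tally-then-derive scheme: one pass fills 8 buckets indexed by the packed agreement pattern (teacher==gold, student==gold, teacher==student), and each of the seven outputs is then derived as a sum of buckets.
import Mathlib
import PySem

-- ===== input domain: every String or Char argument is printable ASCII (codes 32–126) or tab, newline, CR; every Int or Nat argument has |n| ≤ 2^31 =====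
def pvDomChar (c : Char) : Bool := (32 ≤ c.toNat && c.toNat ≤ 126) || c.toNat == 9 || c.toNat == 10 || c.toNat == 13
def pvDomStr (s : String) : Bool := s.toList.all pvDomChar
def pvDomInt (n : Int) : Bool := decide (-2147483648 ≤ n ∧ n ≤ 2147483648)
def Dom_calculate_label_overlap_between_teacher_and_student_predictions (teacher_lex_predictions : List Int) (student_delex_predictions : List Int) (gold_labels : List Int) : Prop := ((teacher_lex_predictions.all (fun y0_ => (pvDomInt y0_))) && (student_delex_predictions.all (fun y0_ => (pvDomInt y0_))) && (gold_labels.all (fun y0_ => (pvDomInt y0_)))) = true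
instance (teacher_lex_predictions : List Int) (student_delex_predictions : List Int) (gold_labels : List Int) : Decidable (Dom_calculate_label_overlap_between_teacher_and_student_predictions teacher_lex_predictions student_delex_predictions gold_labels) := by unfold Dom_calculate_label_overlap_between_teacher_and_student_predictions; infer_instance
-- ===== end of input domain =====

-- B replaces A's seven interleaved running counters by a tally-then-derive two-phase
-- scheme (8 pattern buckets, outputs derived as bucket sums); objective: alternative decomposition.

-- ===== PORT A =====
-- one loop iteration of A: state is the seven counters in A's declaration order
-- (tg, sg, ts, tsng, tsag, sgnt, tgns); x = (student, teacher, gold) from the zip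
def pvStepA (st : Int × Int × Int × Int × Int × Int × Int) (x : Int × Int × Int) :
    Int × Int × Int × Int × Int × Int × Int :=
  match st, x with
  | (tg, sg, ts, tsng, tsag, sgnt, tgns), (student, teacher, gold) =>
    let tg := if teacher = gold then tg + 1 else tg
    let tgns := if teacher = gold then (if ¬ (student = teacher) then tgns + 1 else tgns) else tgns
    let sg := if student = gold then sg + 1 else sg
    let sgnt := if student = gold then (if ¬ (student = teacher) then sgnt + 1 else sgnt) else sgnt
    let ts := if teacher = student then ts + 1 else ts
    let tsng := if teacher = student then (if ¬ (teacher = gold) then tsng + 1 else tsng) else tsng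
    let tsag := if teacher = student then (if teacher = gold then tsag + 1 else tsag) else tsag
    (tg, sg, ts, tsng, tsag, sgnt, tgns)

def calculate_label_overlap_between_teacher_and_student_predictions (teacher_lex_predictions : List Int) (student_delex_predictions : List Int) (gold_labels : List Int) : Int × Int × Int × Int × Int × Int × Int :=
  -- the assert on the three lengths raises AssertionError on mismatch: excluded by Pre_
  match (List.zip student_delex_predictions (List.zip teacher_lex_predictions gold_labels)).foldl
      pvStepA (0, 0, 0, 0, 0, 0, 0) with
  | (tg, sg, ts, tsng, tsag, sgnt, tgns) => (tg, sg, ts, tsng, tsag, sgnt, tgns)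

-- ===== PORT B =====
-- one loop iteration of B's tally phase: counts[4*tg+2*sg+ts] += 1
-- (the Python index is always in range 0..7; getD/set are exact there)
def pvStepB (cs : List Int) (x : Int × Int × Int) : List Int :=
  match x with
  | (student, teacher, gold) =>
    let idx : Nat := (if teacher = gold then 4 else 0) + (if student = gold then 2 else 0) +
                     (if teacher = student then 1 else 0)
    cs.set idx (cs.getD idx 0 + 1)

-- B's derive phase: each output figure is a sum of buckets
def pvDerive (cs : List Int) : Int × Int × Int × Int × Int × Int × Int :=
  (cs.getD 4 0 + cs.getD 5 0 + cs.getD 6 0 + cs.getD 7 0,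
   cs.getD 2 0 + cs.getD 3 0 + cs.getD 6 0 + cs.getD 7 0,
   cs.getD 1 0 + cs.getD 3 0 + cs.getD 5 0 + cs.getD 7 0,
   cs.getD 1 0 + cs.getD 3 0,
   cs.getD 5 0 + cs.getD 7 0,
   cs.getD 2 0 + cs.getD 6 0,
   cs.getD 4 0 + cs.getD 6 0)

def calculate_label_overlap_between_teacher_and_student_predictions_alt (teacher_lex_predictions : List Int) (student_delex_predictions : List Int) (gold_labels : List Int) : Int × Int × Int × Int × Int × Int × Int :=
  -- same assert as A: length mismatch raises, excluded by Pre_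
  let counts := (List.zip student_delex_predictions (List.zip teacher_lex_predictions gold_labels)).foldl
      pvStepB (List.replicate 8 0)
  pvDerive counts

-- ===== PRECONDITION & SPEC =====
-- Pre_ = A's assert: the three lists have equal length (otherwise A — and B — raise AssertionError)
def Pre_calculate_label_overlap_between_teacher_and_student_predictions (teacher_lex_predictions : List Int) (student_delex_predictions : List Int) (gold_labels : List Int) : Prop :=
  student_delex_predictions.length = teacher_lex_predictions.length ∧ teacher_lex_predictions.length = gold_labels.length
instance (teacher_lex_predictions : List Int) (student_delex_predictions : List Int) (gold_labels : List Int) : Decidable (Pre_calculate_label_overlap_between_teacher_and_student_predictions teacher_lex_predictions student_delex_predictions gold_labels) := by unfold Pre_calculate_label_overlap_between_teacher_and_student_predictions; infer_instance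

def pvWitness_calculate_label_overlap_between_teacher_and_student_predictions : List Int × List Int × List Int := ([1, 0, 2], [1, 1, 0], [0, 1, 2])

def Spec_calculate_label_overlap_between_teacher_and_student_predictions (teacher_lex_predictions : List Int) (student_delex_predictions : List Int) (gold_labels : List Int) (out : Int × Int × Int × Int × Int × Int × Int) : Prop := out = calculate_label_overlap_between_teacher_and_student_predictions_alt teacher_lex_predictions student_delex_predictions gold_labels
instance (teacher_lex_predictions : List Int) (student_delex_predictions : List Int) (gold_labels : List Int) (out : Int × Int × Int × Int × Int × Int × Int) : Decidable (Spec_calculate_label_overlap_between_teacher_and_student_predictions teacher_lex_predictions student_delex_predictions gold_labels out) := by unfold Spec_calculate_label_overlap_between_teacher_and_student_predictions; infer_instance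

-- ===== CLAIM (what is proved, stated in full; the proofs are below) =====
def Claim_equal_calculate_label_overlap_between_teacher_and_student_predictions : Prop := ∀ (teacher_lex_predictions : List Int) (student_delex_predictions : List Int) (gold_labels : List Int), Dom_calculate_label_overlap_between_teacher_and_student_predictions teacher_lex_predictions student_delex_predictions gold_labels → Pre_calculate_label_overlap_between_teacher_and_student_predictions teacher_lex_predictions student_delex_predictions gold_labels → Spec_calculate_label_overlap_between_teacher_and_student_predictions teacher_lex_predictions student_delex_predictions gold_labels (calculate_label_overlap_between_teacher_and_student_predictions teacher_lex_predictions student_delex_predictions gold_labels)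

-- ===== LEMMAS AND PROOFS =====

-- the single loop invariant: A's seven counters are the bucket sums of B's tally list
lemma pv_loop (l : List (Int × Int × Int)) :
    ∀ c0 c1 c2 c3 c4 c5 c6 c7 : Int,
      l.foldl pvStepA
        (c4 + c5 + c6 + c7, c2 + c3 + c6 + c7, c1 + c3 + c5 + c7,
         c1 + c3, c5 + c7, c2 + c6, c4 + c6)
      = pvDerive (l.foldl pvStepB [c0, c1, c2, c3, c4, c5, c6, c7]) := by
  induction l with
  | nil =>
    intro c0 c1 c2 c3 c4 c5 c6 c7
    simp [pvDerive, List.getD]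
  | cons hd tl ih =>
    intro c0 c1 c2 c3 c4 c5 c6 c7
    obtain ⟨s, t, g⟩ := hd
    by_cases h1 : t = g <;> by_cases h2 : s = g <;> by_cases h3 : t = s
    · -- pattern (tg, sg, ts): bucket 7
      subst h1; subst h2
      simp [pvStepA, pvStepB, List.set, List.getD]
      rw [← ih c0 c1 c2 c3 c4 c5 c6 (c7 + 1)]
      refine congrFun (congrArg (List.foldl pvStepA) ?_) tl
      simp only [Prod.mk.injEq, and_true, true_and]
      omega
    · exact absurd (h1.trans h2.symm) h3
    · exact absurd (h3.symm.trans h1) h2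
    · -- pattern (tg, ¬sg, ¬ts): bucket 4
      subst h1
      have hst : ¬ s = t := fun h => h3 h.symm
      simp [pvStepA, pvStepB, h2, h3, List.set, List.getD]
      rw [← ih c0 c1 c2 c3 (c4 + 1) c5 c6 c7]
      refine congrFun (congrArg (List.foldl pvStepA) ?_) tl
      simp only [Prod.mk.injEq, true_and]
      omega
    · exact absurd (h3.trans h2) h1
    · -- pattern (¬tg, sg, ¬ts): bucket 2
      subst h2
      have hst : ¬ s = t := fun h => h1 h.symm
      simp [pvStepA, pvStepB, h1, hst, List.set, List.getD]
      rw [← ih c0 c1 (c2 + 1) c3 c4 c5 c6 c7]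
      refine congrFun (congrArg (List.foldl pvStepA) ?_) tl
      simp only [Prod.mk.injEq, and_true, true_and]
      omega
    · -- pattern (¬tg, ¬sg, ts): bucket 1
      subst h3
      simp [pvStepA, pvStepB, h1, List.set, List.getD]
      rw [← ih c0 (c1 + 1) c2 c3 c4 c5 c6 c7]
      refine congrFun (congrArg (List.foldl pvStepA) ?_) tl
      simp only [Prod.mk.injEq, and_true, true_and]
      omega
    · -- pattern (¬tg, ¬sg, ¬ts): bucket 0
      have hst : ¬ s = t := fun h => h3 h.symm
      simp [pvStepA, pvStepB, h1, h2, h3, List.getD]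
      exact ih (c0 + 1) c1 c2 c3 c4 c5 c6 c7

-- ===== VERDICT (by name: the statement is the Claim_ definition above) =====
theorem calculate_label_overlap_between_teacher_and_student_predictions_spec : Claim_equal_calculate_label_overlap_between_teacher_and_student_predictions := by
  intro tl sl gl _ _
  unfold Spec_calculate_label_overlap_between_teacher_and_student_predictions
  unfold calculate_label_overlap_between_teacher_and_student_predictions
  unfold calculate_label_overlap_between_teacher_and_student_predictions_alt
  have h := pv_loop (List.zip sl (List.zip tl gl)) 0 0 0 0 0 0 0 0
  norm_num at h
  simp only [List.replicate]
  rw [← h]
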